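-- pv_equiv track=rewrite | github.com/DeAssisNeto/psd-projeto-2va-python | main/Multiply_matrix_P1.py | get_lines_and_coluns
-- ===== SOURCE A (Python) =====
-- def get_colun(num, mat):
--     return [row[num] for row in mat]
--
-- def get_lines_and_coluns(mat1, mat2):
--     lines_mat1 = []
--     coluns_mat2 = []
--
--     for line in mat1:
--         lines_mat1.append(line)
--
--     for i in range(len(mat2[0])):
--         coluns_mat2.append(get_colun(i, mat2))
--
--     return lines_mat1, coluns_mat2
-- ===== SOURCE B (Python) =====
-- def get_lines_and_coluns(mat1, mat2):
--     lines_mat1 = list(mat1)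
--     ncols = len(mat2[0])
--     coluns_mat2 = [[] for _ in range(ncols)]
--     for row in mat2:
--         for i in range(ncols):
--             coluns_mat2[i].append(row[i])
--     return lines_mat1, coluns_mat2
-- ===== Notes on version B (the rewrite author's own statement) =====
-- stated objective: alternative
-- what changed: B copies mat1 with list() and builds the transpose in one row-major sweep that appends row[i] to every column accumulator at once, instead of A's per-column rescans of all of mat2.
import Mathlib
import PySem

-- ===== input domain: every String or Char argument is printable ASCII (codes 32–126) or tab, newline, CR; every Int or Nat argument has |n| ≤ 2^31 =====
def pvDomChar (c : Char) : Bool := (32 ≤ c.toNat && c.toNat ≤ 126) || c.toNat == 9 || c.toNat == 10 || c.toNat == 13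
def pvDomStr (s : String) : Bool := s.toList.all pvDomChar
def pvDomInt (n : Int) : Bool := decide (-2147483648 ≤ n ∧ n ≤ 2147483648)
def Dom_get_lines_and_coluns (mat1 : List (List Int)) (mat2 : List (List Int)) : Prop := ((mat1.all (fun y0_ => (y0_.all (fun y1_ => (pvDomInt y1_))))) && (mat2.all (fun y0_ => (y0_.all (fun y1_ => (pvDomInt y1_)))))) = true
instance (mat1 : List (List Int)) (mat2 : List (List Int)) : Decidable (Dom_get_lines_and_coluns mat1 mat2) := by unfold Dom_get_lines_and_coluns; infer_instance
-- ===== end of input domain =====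

-- B copies mat1 with list() and builds the transpose in one row-major sweep accumulating
-- every column at once, instead of A's per-column rescans of mat2 (alternative decomposition).

-- ===== PORT A =====
def get_colun (num : Int) (mat : List (List Int)) : List Int :=
  mat.map (fun row => PySem.List.pyGetD row num 0)

def get_lines_and_coluns (mat1 : List (List Int)) (mat2 : List (List Int)) : List (List Int) × List (List Int) :=
  let lines_mat1 := mat1.foldl (fun acc line => acc ++ [line]) []
  let coluns_mat2 :=
    (PySem.List.pyRange 0 (((PySem.List.pyGetD mat2 0 ([] : List Int)).length : Int)) 1).foldl
      (fun acc i => acc ++ [get_colun i mat2]) []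
  (lines_mat1, coluns_mat2)

-- ===== PORT B =====
def get_lines_and_coluns_alt (mat1 : List (List Int)) (mat2 : List (List Int)) : List (List Int) × List (List Int) :=
  let lines_mat1 := mat1
  let ncols := (PySem.List.pyGetD mat2 0 ([] : List Int)).length
  let coluns_mat2 :=
    mat2.foldl (fun cols row => cols.mapIdx (fun i c => c ++ [PySem.List.pyGetD row (i : Int) 0]))
      (List.replicate ncols [])
  (lines_mat1, coluns_mat2)

-- ===== PRECONDITION & SPEC =====
-- Pre_ excludes exactly the inputs where the Python raises IndexError: empty mat2
-- (mat2[0]) and ragged mat2 whose later rows are shorter than row 0.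
def Pre_get_lines_and_coluns (mat1 : List (List Int)) (mat2 : List (List Int)) : Prop :=
  mat2 ≠ [] ∧ ∀ row ∈ mat2, (mat2.headD []).length ≤ row.length
instance (mat1 : List (List Int)) (mat2 : List (List Int)) : Decidable (Pre_get_lines_and_coluns mat1 mat2) := by unfold Pre_get_lines_and_coluns; infer_instance

def pvWitness_get_lines_and_coluns : List (List Int) × List (List Int) := ([[1, 2]], [[3, 4], [5, 6]])

def Spec_get_lines_and_coluns (mat1 : List (List Int)) (mat2 : List (List Int)) (out : List (List Int) × List (List Int)) : Prop := out = get_lines_and_coluns_alt mat1 mat2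
instance (mat1 : List (List Int)) (mat2 : List (List Int)) (out : List (List Int) × List (List Int)) : Decidable (Spec_get_lines_and_coluns mat1 mat2 out) := by unfold Spec_get_lines_and_coluns; infer_instance

-- ===== CLAIM (what is proved, stated in full; the proofs are below) =====
def Claim_equal_get_lines_and_coluns : Prop := ∀ (mat1 : List (List Int)) (mat2 : List (List Int)), Dom_get_lines_and_coluns mat1 mat2 → Pre_get_lines_and_coluns mat1 mat2 → Spec_get_lines_and_coluns mat1 mat2 (get_lines_and_coluns mat1 mat2)

-- ===== LEMMAS AND PROOFS =====

-- B's row-major fold appends, column by column, this row's entries onto the accumulators.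
theorem bfold_mapIdx (rows : List (List Int)) (cols : List (List Int)) :
    rows.foldl (fun cols row => cols.mapIdx (fun i c => c ++ [PySem.List.pyGetD row (i : Int) 0])) cols
      = cols.mapIdx (fun i c => c ++ rows.map (fun row => PySem.List.pyGetD row (i : Int) 0)) := by
  induction rows generalizing cols with
  | nil =>
      simp only [List.foldl_nil, List.map_nil, List.append_nil]
      apply List.ext_getElem <;> simp
  | cons r rows ih =>
      simp only [List.foldl_cons, ih]
      apply List.ext_getElem
      · simp
      · intro i h1 h2
        simp [List.getElem_mapIdx]

theorem get_lines_and_coluns_eq (mat1 : List (List Int)) (mat2 : List (List Int)) :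
    get_lines_and_coluns mat1 mat2 = get_lines_and_coluns_alt mat1 mat2 := by
  unfold get_lines_and_coluns get_lines_and_coluns_alt
  refine Prod.ext ?_ ?_
  · induction mat1 with
    | nil => rfl
    | cons a l ih => simpa [PySem.List.foldl_append_singleton_eq_map] using ih
  · simp only [bfold_mapIdx, PySem.List.foldl_append_singleton_eq_map, List.nil_append]
    apply List.ext_getElem
    · simp [PySem.List.length_pyRange_one]
    · intro i h1 h2
      simp [PySem.List.getElem_pyRange_one, List.getElem_mapIdx, get_colun]

-- ===== VERDICT (by name: the statement is the Claim_ definition above) =====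
theorem get_lines_and_coluns_spec : Claim_equal_get_lines_and_coluns := by
  intro mat1 mat2 _ _
  exact get_lines_and_coluns_eq mat1 mat2
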